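-- pv_equiv track=rewrite | github.com/punsandaisuru1111-art/NutriVision-AI | app.py | fact_chips
-- ===== SOURCE A (Python) =====
-- def fact_chips(nutrition):
--     chips = []
--     cal  = nutrition.get("calories",  0)
--     prot = nutrition.get("protein_g", 0)
--     fat  = nutrition.get("fat_g",     0)
--     sug  = nutrition.get("sugar_g",   0)
--     sod  = nutrition.get("sodium_mg", 0)
--
--     if cal  < 200: chips.append("🟢 Low calorie")
--     if prot > 20:  chips.append("💪 High protein")
--     if fat  < 5:   chips.append("🟢 Low fat")
--     if sug  < 5:   chips.append("🟢 Low sugar")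
--     if sod  < 300: chips.append("🟢 Low sodium")
--     if sod  > 700: chips.append("🔴 High sodium")
--     if fat  > 20:  chips.append("🔴 High fat")
--     if sug  > 12:  chips.append("🔴 High sugar")
--
--     html = "".join(f'<span class="fact-chip">{c}</span>' for c in chips)
--     return f'<div style="margin: 8px 0 4px">{html}</div>'
-- ===== SOURCE B (Python) =====
-- RULES = [
--     ("calories",  0, "lt", 200, "🟢 Low calorie"),
--     ("protein_g", 0, "gt",  20, "💪 High protein"),
--     ("fat_g",     0, "lt",   5, "🟢 Low fat"),
--     ("sugar_g",   0, "lt",   5, "🟢 Low sugar"),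
--     ("sodium_mg", 0, "lt", 300, "🟢 Low sodium"),
--     ("sodium_mg", 0, "gt", 700, "🔴 High sodium"),
--     ("fat_g",     0, "gt",  20, "🔴 High fat"),
--     ("sugar_g",   0, "gt",  12, "🔴 High sugar"),
-- ]
--
-- def fact_chips(nutrition):
--     html = ""
--     for key, default, op, thr, label in RULES:
--         v = nutrition.get(key, default)
--         if (v < thr) if op == "lt" else (v > thr):
--             html += f'<span class="fact-chip">{label}</span>'
--     return f'<div style="margin: 8px 0 4px">{html}</div>'
-- ===== Notes on version B (the rewrite author's own statement) =====
-- stated objective: idiomatic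
-- what changed: Replaces A's five named locals and eight hardcoded if-branches with a data-driven rule table (key, default, comparator, threshold, label) iterated in one loop that appends each chip's HTML directly, instead of building a chips list and mapping/joining it afterwards.
import Mathlib
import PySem

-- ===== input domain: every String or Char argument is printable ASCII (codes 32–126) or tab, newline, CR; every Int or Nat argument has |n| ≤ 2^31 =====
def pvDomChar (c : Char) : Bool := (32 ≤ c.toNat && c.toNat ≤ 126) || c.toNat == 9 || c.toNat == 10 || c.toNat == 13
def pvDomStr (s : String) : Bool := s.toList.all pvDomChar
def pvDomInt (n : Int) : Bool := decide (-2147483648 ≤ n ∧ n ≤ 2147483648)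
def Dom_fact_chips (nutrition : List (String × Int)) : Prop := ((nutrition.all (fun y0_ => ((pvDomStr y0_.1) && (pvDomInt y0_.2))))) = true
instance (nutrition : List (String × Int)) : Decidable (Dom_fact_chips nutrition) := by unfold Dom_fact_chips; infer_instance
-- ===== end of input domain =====

-- B replaces A's eight hardcoded if-branches by a data-driven rule table iterated in one loop (idiomatic; same output, same cost).
-- dict.get(k, d): first-match lookup in the association list (Python dict keys are unique in insertion order)
def pyDictGetD (xs : List (String × Int)) (k : String) (d : Int) : Int :=
  match xs with
  | [] => d
  | (k', v) :: t => if k' == k then v else pyDictGetD t k d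

-- ===== PORT A =====
def fact_chips (nutrition : List (String × Int)) : String :=
  let chips : List String := []
  let cal  := pyDictGetD nutrition "calories"  0
  let prot := pyDictGetD nutrition "protein_g" 0
  let fat  := pyDictGetD nutrition "fat_g"     0
  let sug  := pyDictGetD nutrition "sugar_g"   0
  let sod  := pyDictGetD nutrition "sodium_mg" 0
  let chips := if cal  < 200 then chips ++ ["🟢 Low calorie"]  else chips
  let chips := if prot > 20  then chips ++ ["💪 High protein"] else chips
  let chips := if fat  < 5   then chips ++ ["🟢 Low fat"]      else chips
  let chips := if sug  < 5   then chips ++ ["🟢 Low sugar"]    else chips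
  let chips := if sod  < 300 then chips ++ ["🟢 Low sodium"]   else chips
  let chips := if sod  > 700 then chips ++ ["🔴 High sodium"]  else chips
  let chips := if fat  > 20  then chips ++ ["🔴 High fat"]     else chips
  let chips := if sug  > 12  then chips ++ ["🔴 High sugar"]   else chips
  let html := PySem.Str.join "" (chips.map (fun c => "<span class=\"fact-chip\">" ++ c ++ "</span>"))
  "<div style=\"margin: 8px 0 4px\">" ++ html ++ "</div>"

-- ===== PORT B =====
-- the rule table of Source B: (key, default, op, threshold, label)
def pvRules : List (String × Int × String × Int × String) :=
  [ ("calories",  0, "lt", 200, "🟢 Low calorie"),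
    ("protein_g", 0, "gt",  20, "💪 High protein"),
    ("fat_g",     0, "lt",   5, "🟢 Low fat"),
    ("sugar_g",   0, "lt",   5, "🟢 Low sugar"),
    ("sodium_mg", 0, "lt", 300, "🟢 Low sodium"),
    ("sodium_mg", 0, "gt", 700, "🔴 High sodium"),
    ("fat_g",     0, "gt",  20, "🔴 High fat"),
    ("sugar_g",   0, "gt",  12, "🔴 High sugar") ]

def fact_chips_alt (nutrition : List (String × Int)) : String :=
  let html := pvRules.foldl (fun html r =>
    let v := pyDictGetD nutrition r.1 r.2.1
    if (if r.2.2.1 == "lt" then v < r.2.2.2.1 else v > r.2.2.2.1)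
    then html ++ ("<span class=\"fact-chip\">" ++ r.2.2.2.2 ++ "</span>")
    else html) ""
  "<div style=\"margin: 8px 0 4px\">" ++ html ++ "</div>"

-- ===== PRECONDITION & SPEC =====
def Spec_fact_chips (nutrition : List (String × Int)) (out : String) : Prop := out = fact_chips_alt nutrition
instance (nutrition : List (String × Int)) (out : String) : Decidable (Spec_fact_chips nutrition out) := by unfold Spec_fact_chips; infer_instance

-- ===== CLAIM (what is proved, stated in full; the proofs are below) =====
def Claim_equal_fact_chips : Prop := ∀ (nutrition : List (String × Int)), Dom_fact_chips nutrition → Spec_fact_chips nutrition (fact_chips nutrition)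


-- ===== LEMMAS AND PROOFS =====
-- [] .join with an empty separator is flatten
theorem pvJoinNilFlatten (l : List (List Char)) : PySem.Chars.join [] l = l.flatten := by
  induction l with
  | nil => rfl
  | cons h t ih =>
    cases t with
    | nil => simp [PySem.Chars.join, List.intercalate]
    | cons h2 t2 =>
      simp only [PySem.Chars.join, List.intercalate] at ih ⊢
      simp_all [List.intersperse]

theorem pvJoinAppend (l : List String) (c : String) :
    PySem.Str.join "" (l ++ [c]) = PySem.Str.join "" l ++ c := by
  simp [PySem.Str.join, pvJoinNilFlatten]

-- one chip rule: appending to A's chips list matches appending to B's html accumulator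
theorem pvStep (c : Prop) [Decidable c] (L : List String) (E s : String)
    (h : PySem.Str.join "" (L.map (fun x => "<span class=\"fact-chip\">" ++ x ++ "</span>")) = E) :
    PySem.Str.join "" ((if c then L ++ [s] else L).map (fun x => "<span class=\"fact-chip\">" ++ x ++ "</span>"))
      = if c then E ++ ("<span class=\"fact-chip\">" ++ s ++ "</span>") else E := by
  split_ifs with hc
  · rw [List.map_append, List.map_singleton, pvJoinAppend, h]
  · exact h

-- ===== VERDICT (by name: the statement is the Claim_ definition above) =====
theorem fact_chips_spec : Claim_equal_fact_chips := by
  intro nutrition _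
  unfold Spec_fact_chips fact_chips fact_chips_alt pvRules
  simp only [List.foldl, beq_self_eq_true, if_true,
    (by decide : (("gt" : String) == "lt") = false), if_false,
    (by decide : (false = true) = False)]
  congr 2
  apply pvStep; apply pvStep; apply pvStep; apply pvStep
  apply pvStep; apply pvStep; apply pvStep; apply pvStep
  rfl
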